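-- pv_equiv track=rewrite | github.com/riyoth/adventofcode_2018 | day2.py | part1
-- ===== SOURCE A (Python) =====
-- def part1(input, separator="\n"):
--     global_count = {}
--     global_count[2] = 0
--     global_count[3] = 0
--     for x in input.split("\n"):
--         local_count = {}
--         local_count[2] = 0
--         local_count[3] = 0
--         for c in x:
--             if x.count(c) == 2:
--                 local_count[2] = 1
--             if x.count(c) == 3:
--                 local_count[3] = 1
--         if local_count[2] >= 1:
--             global_count[2] += 1
--         if local_count[3] >= 1:
--             global_count[3] += 1
--
--     return (global_count[2], global_count[3], global_count[2] * global_count[3])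
-- ===== SOURCE B (Python) =====
-- def part1(input, separator="\n"):
--     twos = 0
--     threes = 0
--     for line in input.split("\n"):
--         counts = {}
--         for c in line:
--             counts[c] = counts.get(c, 0) + 1
--         vals = counts.values()
--         if 2 in vals:
--             twos += 1
--         if 3 in vals:
--             threes += 1
--     return (twos, threes, twos * threes)
-- ===== Notes on version B (the rewrite author's own statement) =====
-- stated objective: faster
-- what changed: B builds one character-count dictionary per line and tests whether 2 or 3 occurs among its values, instead of A's rescanning the whole line with x.count(c) for every character and maintaining 0/1 flag dicts.
import Mathlib
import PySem

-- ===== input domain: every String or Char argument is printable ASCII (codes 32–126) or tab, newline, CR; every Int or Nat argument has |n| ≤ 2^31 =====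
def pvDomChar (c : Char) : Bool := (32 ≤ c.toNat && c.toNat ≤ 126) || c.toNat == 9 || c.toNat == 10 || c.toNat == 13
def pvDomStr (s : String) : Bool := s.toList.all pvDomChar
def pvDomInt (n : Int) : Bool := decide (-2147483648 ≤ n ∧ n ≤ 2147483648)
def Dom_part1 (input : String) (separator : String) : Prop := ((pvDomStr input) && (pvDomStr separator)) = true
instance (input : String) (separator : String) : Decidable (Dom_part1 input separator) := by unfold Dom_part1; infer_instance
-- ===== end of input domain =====

-- B replaces A's per-line quadratic `x.count(c)` rescans by one character-count dictionary per
-- line whose values are tested for 2 and 3 (objective: faster). Like A, B splits on the literal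
-- "\n" and ignores the `separator` parameter.

-- ===== PORT A =====
def part1 (input : String) (_separator : String) : List Int :=
  let g0 : PySem.Dict Int Int := ((PySem.Dict.empty).insert 2 0).insert 3 0
  let g := (PySem.Chars.splitOn input.toList ['\n']).foldl (fun g x =>
      let l0 : PySem.Dict Int Int := ((PySem.Dict.empty).insert 2 0).insert 3 0
      let lc := x.foldl (fun (l : PySem.Dict Int Int) c =>
          let l := if PySem.Chars.count x [c] = 2 then l.insert 2 1 else l
          if PySem.Chars.count x [c] = 3 then l.insert 3 1 else l) l0
      let g := if lc.getD 2 0 >= 1 then g.insert 2 (g.getD 2 0 + 1) else g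
      if lc.getD 3 0 >= 1 then g.insert 3 (g.getD 3 0 + 1) else g) g0
  [g.getD 2 0, g.getD 3 0, g.getD 2 0 * g.getD 3 0]

-- ===== PORT B =====
def part1_alt (input : String) (_separator : String) : List Int :=
  let r := (PySem.Chars.splitOn input.toList ['\n']).foldl (fun (acc : Int × Int) line =>
      let counts := line.foldl (fun (d : PySem.Dict Char Int) c => d.insert c (d.getD c 0 + 1))
        PySem.Dict.empty
      let vals := counts.values
      let twos := if vals.contains 2 then acc.1 + 1 else acc.1
      let threes := if vals.contains 3 then acc.2 + 1 else acc.2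
      (twos, threes)) (0, 0)
  [r.1, r.2, r.1 * r.2]

-- ===== PRECONDITION & SPEC =====
def Spec_part1 (input : String) (separator : String) (out : List Int) : Prop := out = part1_alt input separator
instance (input : String) (separator : String) (out : List Int) : Decidable (Spec_part1 input separator out) := by unfold Spec_part1; infer_instance

-- ===== CLAIM (what is proved, stated in full; the proofs are below) =====
def Claim_equal_part1 : Prop := ∀ (input : String) (separator : String), Dom_part1 input separator → Spec_part1 input separator (part1 input separator)

-- ===== LEMMAS AND PROOFS =====

theorem chars_count_go_singleton (c : Char) :
    ∀ (l : List Char) (fuel acc : Nat), l.length ≤ fuel →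
      PySem.Chars.count.go [c] fuel l acc = acc + l.count c := by
  intro l
  induction l with
  | nil =>
      intro fuel acc _
      cases fuel <;> simp [PySem.Chars.count.go]
  | cons h t ih =>
      intro fuel acc hf
      cases fuel with
      | zero => simp at hf
      | succ n =>
        rw [PySem.Chars.count.go]
        by_cases hc : h = c
        · subst hc
          have hpre : List.isPrefixOf [h] (h :: t) = true := by simp [List.isPrefixOf]
          simp only [hpre, if_true, List.length_singleton, List.drop_one, List.tail_cons]
          rw [ih n (acc + 1) (by simp at hf; omega)]
          simp [List.count_cons]
          omega
        · have hpre : List.isPrefixOf [c] (h :: t) = false := by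
            simp [List.isPrefixOf]
            exact fun hch => absurd hch.symm hc
          simp only [hpre, Bool.false_eq_true, if_false]
          rw [ih n acc (by simp at hf; omega)]
          simp [List.count_cons, hc]

theorem chars_count_singleton (x : List Char) (c : Char) :
    PySem.Chars.count x [c] = x.count c := by
  unfold PySem.Chars.count
  simp only [List.isEmpty_cons, Bool.false_eq_true, if_false]
  rw [chars_count_go_singleton c x x.length 0 (le_refl _)]
  omega

theorem a_local_getD (x : List Char) (k : Nat) (hk : k = 2 ∨ k = 3) :
    ∀ (m : List Char) (d : PySem.Dict Int Int),
      (m.foldl (fun (l : PySem.Dict Int Int) c =>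
          let l := if PySem.Chars.count x [c] = 2 then l.insert 2 1 else l
          if PySem.Chars.count x [c] = 3 then l.insert 3 1 else l) d).getD (k : Int) 0 =
        if (∃ c ∈ m, x.count c = k) then 1 else d.getD (k : Int) 0 := by
  intro m
  induction m with
  | nil => intro d; simp
  | cons h t ih =>
      intro d
      simp only [List.foldl_cons]
      rw [ih]
      by_cases hex : (∃ c ∈ t, x.count c = k)
      · have hor : (∃ c ∈ h :: t, x.count c = k) := by
          rcases hex with ⟨c, hc, hcc⟩; exact ⟨c, List.mem_cons_of_mem _ hc, hcc⟩
        simp [hex, hor]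
      · simp only [hex, if_false]
        by_cases hh : x.count h = k
        · have hor : (∃ c ∈ h :: t, x.count c = k) := ⟨h, List.mem_cons_self, hh⟩
          simp only [hor, if_true]
          rcases hk with hk | hk <;> subst hk <;>
            simp [chars_count_singleton, hh, PySem.Dict.getD_insert] <;> split_ifs <;> simp_all [PySem.Dict.getD_insert]
        · have hor : ¬ (∃ c ∈ h :: t, x.count c = k) := by
            simp_all [List.mem_cons]
          simp only [hor, if_false]
          rcases hk with hk | hk <;> subst hk <;>
            simp [chars_count_singleton, PySem.Dict.getD_insert] <;> split_ifs <;> simp_all [PySem.Dict.getD_insert]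

theorem b_local_contains (line : List Char) (n : Nat) :
    ((line.foldl (fun (d : PySem.Dict Char Int) c => d.insert c (d.getD c 0 + 1))
        PySem.Dict.empty).values.contains (n : Int)) =
      decide (∃ c ∈ line, line.count c = n) := by
  rw [PySem.Dict.foldl_insert_getD_add_one_eq_counter]
  have hv : (PySem.Dict.counter line).values
      = (PySem.Set.ofList line).map (fun k => ((line.count k : Nat) : Int)) := by
    show (PySem.Dict.counter line).items.map (·.2) = _
    rw [PySem.Dict.items_counter]
    simp
  rw [hv]
  by_cases hex : ∃ c ∈ line, line.count c = n
  · simp only [hex, decide_true]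
    rcases hex with ⟨c, hc, hcc⟩
    rw [List.contains_iff_mem]
    simp only [List.mem_map]
    exact ⟨c, (PySem.Set.mem_ofList line c).2 hc, by exact_mod_cast congrArg (Nat.cast (R := Int)) hcc⟩
  · simp only [hex, decide_false]
    rw [← Bool.not_eq_true, List.contains_iff_mem]
    simp only [List.mem_map, not_exists, not_and]
    intro c hc
    have hc' := (PySem.Set.mem_ofList line c).1 hc
    intro hcc
    exact hex ⟨c, hc', by exact_mod_cast hcc⟩

def stepA (g : PySem.Dict Int Int) (x : List Char) : PySem.Dict Int Int :=
  let l0 : PySem.Dict Int Int := ((PySem.Dict.empty).insert 2 0).insert 3 0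
  let lc := x.foldl (fun (l : PySem.Dict Int Int) c =>
      let l := if PySem.Chars.count x [c] = 2 then l.insert 2 1 else l
      if PySem.Chars.count x [c] = 3 then l.insert 3 1 else l) l0
  let g := if lc.getD 2 0 >= 1 then g.insert 2 (g.getD 2 0 + 1) else g
  if lc.getD 3 0 >= 1 then g.insert 3 (g.getD 3 0 + 1) else g

def stepB (acc : Int × Int) (line : List Char) : Int × Int :=
  let counts := line.foldl (fun (d : PySem.Dict Char Int) c => d.insert c (d.getD c 0 + 1))
    PySem.Dict.empty
  let vals := counts.values
  let twos := if vals.contains 2 then acc.1 + 1 else acc.1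
  let threes := if vals.contains 3 then acc.2 + 1 else acc.2
  (twos, threes)

theorem outer_inv (lines : List (List Char)) :
    ∀ (g : PySem.Dict Int Int) (t th : Int), g.getD 2 0 = t → g.getD 3 0 = th →
      (lines.foldl stepA g).getD 2 0 = (lines.foldl stepB (t, th)).1 ∧
      (lines.foldl stepA g).getD 3 0 = (lines.foldl stepB (t, th)).2 := by
  induction lines with
  | nil => intro g t th h2 h3; exact ⟨h2, h3⟩
  | cons x rest ih =>
      intro g t th h2 h3
      simp only [List.foldl_cons]
      have hA2 := a_local_getD x 2 (Or.inl rfl) x (((PySem.Dict.empty).insert 2 0).insert 3 0)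
      have hA3 := a_local_getD x 3 (Or.inr rfl) x (((PySem.Dict.empty).insert 2 0).insert 3 0)
      have hB2 := b_local_contains x 2
      have hB3 := b_local_contains x 3
      by_cases e2 : ∃ c ∈ x, x.count c = 2 <;> by_cases e3 : ∃ c ∈ x, x.count c = 3 <;>
        apply ih <;>
          simp_all [stepA, stepB, PySem.Dict.getD_insert]

-- ===== VERDICT (by name: the statement is the Claim_ definition above) =====
theorem part1_spec : Claim_equal_part1 := by
  intro input separator _
  unfold Spec_part1 part1 part1_alt
  have h := outer_inv (PySem.Chars.splitOn input.toList ['\n'])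
    (((PySem.Dict.empty).insert 2 0).insert 3 0) 0 0 (by decide) (by decide)
  show [(List.foldl stepA (((PySem.Dict.empty).insert 2 0).insert 3 0)
            (PySem.Chars.splitOn input.toList ['\n'])).getD 2 0,
         (List.foldl stepA (((PySem.Dict.empty).insert 2 0).insert 3 0)
            (PySem.Chars.splitOn input.toList ['\n'])).getD 3 0,
         (List.foldl stepA (((PySem.Dict.empty).insert 2 0).insert 3 0)
            (PySem.Chars.splitOn input.toList ['\n'])).getD 2 0 *
           (List.foldl stepA (((PySem.Dict.empty).insert 2 0).insert 3 0)
              (PySem.Chars.splitOn input.toList ['\n'])).getD 3 0] =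
        [(List.foldl stepB (0, 0) (PySem.Chars.splitOn input.toList ['\n'])).1,
         (List.foldl stepB (0, 0) (PySem.Chars.splitOn input.toList ['\n'])).2,
         (List.foldl stepB (0, 0) (PySem.Chars.splitOn input.toList ['\n'])).1 *
           (List.foldl stepB (0, 0) (PySem.Chars.splitOn input.toList ['\n'])).2]
  rw [h.1, h.2]
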